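-- pv_equiv track=rewrite | github.com/mattj23/m-notes | mnotes/fix/common.py | add_words_up_to
-- ===== SOURCE A (Python) =====
-- from typing import Optional, Tuple, List, Set, Callable
--
-- def add_words_up_to(length: int, word_set: List[str]) -> List[str]:
--     working_words = list(word_set)
--     built_words = []
--     while working_words:
--         active_word = working_words.pop(0)
--         temp = built_words + [active_word]
--         if len(temp) == 1 or len("-".join(temp)) < length:
--             built_words = list(temp)
--         else:
--             return built_words
--     return built_words
-- ===== SOURCE B (Python) =====
-- from typing import List
--
-- def add_words_up_to(length: int, word_set: List[str]) -> List[str]: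
--     # Single pass with a running joined-length counter; returns a slice instead
--     # of repeated pop(0)/re-join.
--     if not word_set:
--         return []
--     total = len(word_set[0])
--     i = 1
--     while i < len(word_set) and total + 1 + len(word_set[i]) < length:
--         total += 1 + len(word_set[i])
--         i += 1
--     return list(word_set[:i])
-- ===== Notes on version B (the rewrite author's own statement) =====
-- stated objective: faster
-- what changed: Replaces the while-pop(0)-and-rejoin loop (which re-joins the whole prefix each iteration) with a single pass keeping a running joined-length counter and an index, then returns one slice.
import Mathlib
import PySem

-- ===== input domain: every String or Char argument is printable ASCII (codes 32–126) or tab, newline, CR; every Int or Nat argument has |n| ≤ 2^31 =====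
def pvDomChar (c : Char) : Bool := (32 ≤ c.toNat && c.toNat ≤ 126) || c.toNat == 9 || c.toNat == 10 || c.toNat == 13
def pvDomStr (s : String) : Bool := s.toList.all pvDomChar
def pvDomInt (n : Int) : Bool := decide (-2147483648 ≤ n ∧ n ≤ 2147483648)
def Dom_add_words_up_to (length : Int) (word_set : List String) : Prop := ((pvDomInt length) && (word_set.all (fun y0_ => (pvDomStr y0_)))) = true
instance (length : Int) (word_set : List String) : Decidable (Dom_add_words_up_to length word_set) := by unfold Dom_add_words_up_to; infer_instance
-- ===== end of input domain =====

-- B replaces A's while-pop(0)-and-rejoin loop with a single pass keeping a running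
-- joined-length counter, returning one slice (faster: no re-join of the prefix each step).


-- ===== PORT A =====
-- the while loop: working_words is the first argument, built_words the accumulator
def add_words_up_to_loop (length : Int) : List String → List String → List String
  | [], built => built
  | active :: rest, built =>
    let temp := built ++ [active]
    if temp.length = 1 ∨ PySem.Str.len (PySem.Str.join "-" temp) < length then
      add_words_up_to_loop length rest temp
    else built

def add_words_up_to (length : Int) (word_set : List String) : List String :=
  add_words_up_to_loop length word_set []

-- ===== PORT B =====
-- the while loop: counts how many further words fit, with the running total length
def add_words_up_to_alt_count (length : Int) : List String → Int → Nat
  | [], _ => 0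
  | w :: rest, total =>
    if total + 1 + PySem.Str.len w < length then
      1 + add_words_up_to_alt_count length rest (total + 1 + PySem.Str.len w)
    else 0

def add_words_up_to_alt (length : Int) (word_set : List String) : List String :=
  match word_set with
  | [] => []
  | w :: rest => word_set.take (1 + add_words_up_to_alt_count length rest (PySem.Str.len w))

-- ===== PRECONDITION & SPEC =====
def Spec_add_words_up_to (length : Int) (word_set : List String) (out : List String) : Prop := out = add_words_up_to_alt length word_set
instance (length : Int) (word_set : List String) (out : List String) : Decidable (Spec_add_words_up_to length word_set out) := by unfold Spec_add_words_up_to; infer_instance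

-- ===== CLAIM (what is proved, stated in full; the proofs are below) =====
def Claim_equal_add_words_up_to : Prop := ∀ (length : Int) (word_set : List String), Dom_add_words_up_to length word_set → Spec_add_words_up_to length word_set (add_words_up_to length word_set)

-- ===== LEMMAS AND PROOFS =====

-- length of '-'.join on the char side: appending one more part adds 1 + its length
theorem jchars_snoc (p q : List Char) (ps : List (List Char)) :
    (PySem.Chars.join ['-'] ((p :: ps) ++ [q])).length
      = (PySem.Chars.join ['-'] (p :: ps)).length + 1 + q.length := by
  induction ps generalizing p with
  | nil =>
    simp [PySem.Chars.join_cons_cons, PySem.Chars.join_singleton]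
    omega
  | cons r rs ih =>
    rw [List.cons_append, List.cons_append, PySem.Chars.join_cons_cons,
        PySem.Chars.join_cons_cons]
    have h := ih r
    rw [List.cons_append] at h
    simp [h]
    omega

-- the same on the String side, in Int form
theorem jlen_snoc (built : List String) (w : String) (hb : built ≠ []) :
    PySem.Str.len (PySem.Str.join "-" (built ++ [w]))
      = PySem.Str.len (PySem.Str.join "-" built) + 1 + PySem.Str.len w := by
  obtain ⟨b, bs, rfl⟩ : ∃ b bs, built = b :: bs := by
    cases built with
    | nil => exact absurd rfl hb
    | cons b bs => exact ⟨b, bs, rfl⟩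
  simp only [PySem.Str.len_eq, PySem.Str.toList_join]
  have : "-".toList = ['-'] := rfl
  rw [this]
  have h := jchars_snoc b.toList w.toList (bs.map String.toList)
  simp only [List.map_append, List.map_cons, List.map_nil] at *
  rw [h]
  push_cast
  ring

theorem loop_eq_take (length : Int) (rest built : List String) (hb : built ≠ []) :
    add_words_up_to_loop length rest built
      = built ++ rest.take (add_words_up_to_alt_count length rest
          (PySem.Str.len (PySem.Str.join "-" built))) := by
  induction rest generalizing built with
  | nil => simp [add_words_up_to_loop]
  | cons w rest ih =>
    rw [add_words_up_to_loop, add_words_up_to_alt_count]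
    have hlen : (built ++ [w]).length ≠ 1 := by
      cases built with
      | nil => exact absurd rfl hb
      | cons b bs => simp
    rw [jlen_snoc built w hb]
    by_cases hc : PySem.Str.len (PySem.Str.join "-" built) + 1 + PySem.Str.len w < length
    · rw [if_pos (Or.inr hc), if_pos hc, ih (built ++ [w]) (by simp),
          jlen_snoc built w hb]
      simp [Nat.one_add, List.take_succ_cons]
    · rw [if_neg (not_or.mpr ⟨hlen, hc⟩), if_neg hc]
      simp

-- ===== VERDICT (by name: the statement is the Claim_ definition above) =====
theorem add_words_up_to_spec : Claim_equal_add_words_up_to := by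
  intro length word_set _
  unfold Spec_add_words_up_to add_words_up_to add_words_up_to_alt
  cases word_set with
  | nil => simp [add_words_up_to_loop]
  | cons w rest =>
    rw [add_words_up_to_loop, if_pos (Or.inl (by simp))]
    simp only [List.nil_append]
    rw [loop_eq_take length rest [w] (by simp)]
    have : PySem.Str.join "-" [w] = w := by
      apply String.toList_injective  -- join of a singleton is the word itself
      rw [PySem.Str.toList_join]
      simp [PySem.Chars.join_singleton]
    rw [this]
    simp [Nat.one_add, List.take_succ_cons]
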